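-- pv_equiv track=rewrite | github.com/sjsawyer/aoc-2020 | q12/q12.py | rotate_waypoint
-- ===== SOURCE A (Python) =====
-- def rotate_waypoint(waypoint, n, a):
--     n_rotations = n // 90
--     x, y = waypoint
--     if a == 'R':
--         # rotate clockwise
--         for _ in range(n_rotations):
--             x, y = y, -x
--     elif a == 'L':
--         # rotate counter-clockwise
--         for _ in range(n_rotations):
--             x, y = -y, x
--     return [x, y]
-- ===== SOURCE B (Python) =====
-- def rotate_waypoint(waypoint, n, a):
--     x, y = waypoint
--     r = max(n // 90, 0) % 4
--     if a == 'R':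
--         if r == 1:
--             return [y, -x]
--         if r == 2:
--             return [-x, -y]
--         if r == 3:
--             return [-y, x]
--     elif a == 'L':
--         if r == 1:
--             return [-y, x]
--         if r == 2:
--             return [-x, -y]
--         if r == 3:
--             return [y, -x]
--     return [x, y]
-- ===== Notes on version B (the rewrite author's own statement) =====
-- stated objective: alternative
-- what changed: Replaces the step-by-step rotation loop (n//90 iterations) by a closed-form dispatch on (n//90 clamped at 0) mod 4, using the period-4 structure of 90-degree rotations.
import Mathlib
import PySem

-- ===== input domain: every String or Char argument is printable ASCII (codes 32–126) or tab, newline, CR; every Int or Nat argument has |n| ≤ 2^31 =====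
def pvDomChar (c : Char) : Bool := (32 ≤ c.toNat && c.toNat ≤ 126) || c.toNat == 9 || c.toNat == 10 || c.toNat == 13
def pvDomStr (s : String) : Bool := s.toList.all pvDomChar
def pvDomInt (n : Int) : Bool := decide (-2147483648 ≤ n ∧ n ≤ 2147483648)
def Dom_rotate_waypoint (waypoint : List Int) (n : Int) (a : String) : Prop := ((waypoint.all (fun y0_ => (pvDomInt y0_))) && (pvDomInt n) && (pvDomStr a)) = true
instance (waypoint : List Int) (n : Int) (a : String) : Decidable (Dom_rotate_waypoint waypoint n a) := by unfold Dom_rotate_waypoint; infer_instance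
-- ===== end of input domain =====

-- B replaces A's per-90-degree rotation loop by a closed-form dispatch on (n//90, clamped at 0) mod 4.
-- Pre_ excludes waypoints whose length is not 2, on which A raises ValueError (unpacking).
-- ===== PORT A =====
def rotate_waypoint (waypoint : List Int) (n : Int) (a : String) : List Int :=
  let n_rotations := PySem.Int.floordiv n 90
  match waypoint with
  | [x, y] =>
    if a == "R" then
      let p := (PySem.List.pyRange 0 n_rotations 1).foldl
        (fun (p : Int × Int) _ => (p.2, -p.1)) (x, y)
      [p.1, p.2]
    else if a == "L" then
      let p := (PySem.List.pyRange 0 n_rotations 1).foldl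
        (fun (p : Int × Int) _ => (-p.2, p.1)) (x, y)
      [p.1, p.2]
    else [x, y]
  | _ => []  -- ValueError in Python; excluded by Pre_

-- ===== PORT B =====
def rotate_waypoint_alt (waypoint : List Int) (n : Int) (a : String) : List Int :=
  if waypoint.length = 2 then
    let x := waypoint.headD 0        -- total forms of the unpacking; guarded by the length test
    let y := waypoint.tail.headD 0
    let r := PySem.Int.mod (max (PySem.Int.floordiv n 90) 0) 4
    if a == "R" then
      if r == 1 then [y, -x]
      else if r == 2 then [-x, -y]
      else if r == 3 then [-y, x]
      else [x, y]
    else if a == "L" then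
      if r == 1 then [-y, x]
      else if r == 2 then [-x, -y]
      else if r == 3 then [y, -x]
      else [x, y]
    else [x, y]
  else []  -- ValueError in Python; excluded by Pre_

-- ===== PRECONDITION & SPEC =====
-- Pre_ excludes exactly the inputs where A raises ValueError: waypoint must unpack into two values.
def Pre_rotate_waypoint (waypoint : List Int) (n : Int) (a : String) : Prop := waypoint.length = 2
instance (waypoint : List Int) (n : Int) (a : String) : Decidable (Pre_rotate_waypoint waypoint n a) := by unfold Pre_rotate_waypoint; infer_instance
def pvWitness_rotate_waypoint : List Int × Int × String := ([3, 4], 90, "R")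
def Spec_rotate_waypoint (waypoint : List Int) (n : Int) (a : String) (out : List Int) : Prop := out = rotate_waypoint_alt waypoint n a
instance (waypoint : List Int) (n : Int) (a : String) (out : List Int) : Decidable (Spec_rotate_waypoint waypoint n a out) := by unfold Spec_rotate_waypoint; infer_instance

-- ===== CLAIM (what is proved, stated in full; the proofs are below) =====
def Claim_equal_rotate_waypoint : Prop := ∀ (waypoint : List Int) (n : Int) (a : String), Dom_rotate_waypoint waypoint n a → Pre_rotate_waypoint waypoint n a → Spec_rotate_waypoint waypoint n a (rotate_waypoint waypoint n a)

-- ===== LEMMAS AND PROOFS =====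

-- a fold with a state-only step is function iteration
theorem foldl_const_step {α β : Type} (g : α → α) (l : List β) (s : α) :
    l.foldl (fun p _ => g p) s = g^[l.length] s := by
  induction l generalizing s with
  | nil => rfl
  | cons h t ih => simp [List.foldl, ih, Function.iterate_succ_apply]

def cwStep (p : Int × Int) : Int × Int := (p.2, -p.1)
def ccwStep (p : Int × Int) : Int × Int := (-p.2, p.1)

theorem cw_four (p : Int × Int) : cwStep^[4] p = p := by
  simp [Function.iterate_succ_apply, cwStep]

theorem ccw_four (p : Int × Int) : ccwStep^[4] p = p := by
  simp [Function.iterate_succ_apply, ccwStep]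

theorem iterate_mod_four {f : Int × Int → Int × Int} (hf : ∀ p, f^[4] p = p)
    (m : Nat) (p : Int × Int) : f^[m] p = f^[m % 4] p := by
  induction m using Nat.strong_induction_on with
  | _ m ih =>
    rcases Nat.lt_or_ge m 4 with h | h
    · rw [Nat.mod_eq_of_lt h]
    · obtain ⟨k, rfl⟩ : ∃ k, m = k + 4 := ⟨m - 4, by omega⟩
      rw [Function.iterate_add_apply, hf, ih k (by omega)]
      congr 1
      omega

theorem pyRange_len (q : Int) : (PySem.List.pyRange 0 q 1).length = q.toNat := by
  rw [PySem.List.pyRange_one]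
  simp

theorem mod_max_eq (q : Int) : PySem.Int.mod (max q 0) 4 = ((q.toNat % 4 : Nat) : Int) := by
  have h1 : max q 0 = ((q.toNat : Nat) : Int) := by omega
  rw [h1]
  exact_mod_cast PySem.Int.mod_natCast q.toNat 4

-- ===== VERDICT (by name: the statement is the Claim_ definition above) =====
theorem rotate_waypoint_spec : Claim_equal_rotate_waypoint := by
  intro waypoint n a _ hpre
  unfold Pre_rotate_waypoint at hpre
  rcases waypoint with _ | ⟨x, _ | ⟨y, _ | ⟨z, t⟩⟩⟩ <;> simp at hpre
  show rotate_waypoint [x, y] n a = rotate_waypoint_alt [x, y] n a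
  unfold rotate_waypoint rotate_waypoint_alt
  set q := PySem.Int.floordiv n 90 with hq
  have hlen := pyRange_len q
  have hmod := mod_max_eq q
  have hcw : (PySem.List.pyRange 0 q 1).foldl (fun (p : Int × Int) _ => (p.2, -p.1)) (x, y)
      = cwStep^[q.toNat % 4] (x, y) := by
    rw [show (fun (p : Int × Int) (_ : Int) => (p.2, -p.1)) = (fun p _ => cwStep p) from rfl,
      foldl_const_step, hlen, iterate_mod_four cw_four]
  have hccw : (PySem.List.pyRange 0 q 1).foldl (fun (p : Int × Int) _ => (-p.2, p.1)) (x, y)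
      = ccwStep^[q.toNat % 4] (x, y) := by
    rw [show (fun (p : Int × Int) (_ : Int) => (-p.2, p.1)) = (fun p _ => ccwStep p) from rfl,
      foldl_const_step, hlen, iterate_mod_four ccw_four]
  have h4 : q.toNat % 4 = 0 ∨ q.toNat % 4 = 1 ∨ q.toNat % 4 = 2 ∨ q.toNat % 4 = 3 := by omega
  rcases h4 with h | h | h | h <;>
    simp only [hcw, hccw, hmod, h] <;>
    by_cases hR : a == "R" <;> by_cases hL : a == "L" <;>
    simp [hR, hL, cwStep, ccwStep, Function.iterate_succ_apply]
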